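-- pv_equiv track=rewrite | github.com/Swapnil05Rai/gfgpotd | numsub.py | no_of_subarrays
-- ===== SOURCE A (Python) =====
-- def no_of_subarrays(n,arr):
--     last=-1
--     cur=-1
--     result=0
--     for i in range(n):
--         if arr[i]==1 and last!=-1:
--             diff=cur-last+1
--             result+=diff*(diff+1)//2
--             cur=-1
--             last=-1
--         elif arr[i]==0:
--             if last==-1:
--                 last=i
--                 cur=i
--             else:
--                 cur=i
--     if last!=-1:
--         diff=cur-last+1
--         result+=diff*(diff+1)//2
--     return result
-- ===== SOURCE B (Python) =====
-- def no_of_subarrays(n, arr):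
--     # Split arr[:n] into segments bounded by 1s, then for each segment count
--     # subarrays of the index span from its first zero to its last zero.
--     segs = []
--     cur = []
--     for x in arr[:max(n, 0)]:
--         if x == 1:
--             segs.append(cur)
--             cur = []
--         else:
--             cur.append(x)
--     segs.append(cur)
--     total = 0
--     for seg in segs:
--         i = 0
--         j = len(seg) - 1
--         while i < len(seg) and seg[i] != 0:
--             i += 1
--         while j >= 0 and seg[j] != 0:
--             j -= 1
--         if i <= j:
--             span = j - i + 1
--             total += span * (span + 1) // 2
--     return total
-- ===== Notes on version B (the rewrite author's own statement) =====
-- stated objective: alternative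
-- what changed: B replaces A's single streaming pass with first/last-zero index bookkeeping by a split of arr[:n] into segments bounded by 1s, then per segment strips leading/trailing non-zeros and adds span*(span+1)//2.
import Mathlib
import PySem

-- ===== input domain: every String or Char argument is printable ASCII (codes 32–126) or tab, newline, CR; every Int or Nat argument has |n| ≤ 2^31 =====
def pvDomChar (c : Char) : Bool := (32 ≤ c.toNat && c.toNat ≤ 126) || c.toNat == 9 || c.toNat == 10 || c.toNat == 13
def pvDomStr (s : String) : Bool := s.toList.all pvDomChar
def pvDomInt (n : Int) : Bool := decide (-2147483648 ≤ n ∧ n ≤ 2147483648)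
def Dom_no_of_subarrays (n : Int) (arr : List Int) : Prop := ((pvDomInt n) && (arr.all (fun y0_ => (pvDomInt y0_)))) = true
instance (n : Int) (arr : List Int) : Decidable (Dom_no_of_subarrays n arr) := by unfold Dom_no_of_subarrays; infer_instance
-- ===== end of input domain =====

-- B re-decomposes A's streaming index bookkeeping: it splits arr[:n] into segments
-- bounded by 1s and counts, per segment, subarrays of the span from its first to its
-- last zero (objective: alternative decomposition, same asymptotic cost).

-- ===== PORT A =====
-- loop body of A's `for i in range(n)` (state = (last, cur, result))
def pvStepA (arr : List Int) (st : Int × Int × Int) (i : Int) : Int × Int × Int :=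
  if PySem.List.pyGetD arr i 0 = 1 ∧ st.1 ≠ -1 then
    let diff := st.2.1 - st.1 + 1
    (-1, -1, st.2.2 + PySem.Int.floordiv (diff * (diff + 1)) 2)
  else if PySem.List.pyGetD arr i 0 = 0 then
    (if st.1 = -1 then (i, i, st.2.2) else (st.1, i, st.2.2))
  else st

-- the final `if last!=-1: result += ...; return result`
def pvFinishA (st : Int × Int × Int) : Int :=
  if st.1 ≠ -1 then
    let diff := st.2.1 - st.1 + 1
    st.2.2 + PySem.Int.floordiv (diff * (diff + 1)) 2
  else st.2.2

def no_of_subarrays (n : Int) (arr : List Int) : Int :=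
  pvFinishA ((PySem.List.pyRange 0 n 1).foldl (pvStepA arr) (-1, -1, 0))

-- ===== PORT B =====
-- first loop of B: split the prefix on 1s into segments
def pvStepB (p : List (List Int) × List Int) (x : Int) : List (List Int) × List Int :=
  if x = 1 then (p.1 ++ [p.2], ([] : List Int)) else (p.1, p.2 ++ [x])

-- B's front scan `while i < len(seg) and seg[i] != 0: i += 1` (number of steps taken)
def pvScan : List Int → Nat
  | [] => 0
  | x :: t => if x != 0 then pvScan t + 1 else 0

-- B's per-segment body: the two index scans (the backward `j` scan walks the
-- reversed list), then span*(span+1)//2 if a zero was found (i ≤ j)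
def pvSegCount (seg : List Int) : Int :=
  let i : Int := pvScan seg
  let j : Int := (seg.length : Int) - 1 - pvScan seg.reverse
  if i ≤ j then
    let span := j - i + 1
    PySem.Int.floordiv (span * (span + 1)) 2
  else 0

def no_of_subarrays_alt (n : Int) (arr : List Int) : Int :=
  let sc := (PySem.List.slice arr none (some (max n 0))).foldl pvStepB ([], [])
  (sc.1 ++ [sc.2]).foldl (fun total seg => total + pvSegCount seg) 0

-- ===== PRECONDITION & SPEC =====
-- A indexes arr[i] for i in range(n): it raises IndexError when n > len(arr);
-- Pre_ excludes exactly those inputs (negative n is fine: both return 0).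
def Pre_no_of_subarrays (n : Int) (arr : List Int) : Prop := n ≤ arr.length
instance (n : Int) (arr : List Int) : Decidable (Pre_no_of_subarrays n arr) := by unfold Pre_no_of_subarrays; infer_instance
def pvWitness_no_of_subarrays : Int × List Int := (5, [0, 2, 0, 1, 0])

def Spec_no_of_subarrays (n : Int) (arr : List Int) (out : Int) : Prop := out = no_of_subarrays_alt n arr
instance (n : Int) (arr : List Int) (out : Int) : Decidable (Spec_no_of_subarrays n arr out) := by unfold Spec_no_of_subarrays; infer_instance

-- ===== CLAIM (what is proved, stated in full; the proofs are below) =====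
def Claim_equal_no_of_subarrays : Prop := ∀ (n : Int) (arr : List Int), Dom_no_of_subarrays n arr → Pre_no_of_subarrays n arr → Spec_no_of_subarrays n arr (no_of_subarrays n arr)

-- ===== LEMMAS AND PROOFS =====

-- n*(n+1)//2 as used by both ports
def pvTri (d : Int) : Int := PySem.Int.floordiv (d * (d + 1)) 2

-- the zero-stripping predicate both helpers use
def pvP : Int → Bool := fun x => x != 0

-- index of the first zero of a segment / span from its first to its last zero
def pvFront (cs : List Int) : Int := ((cs.takeWhile pvP).length : Int)
def pvCoreLen (cs : List Int) : Int :=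
  ((((cs.dropWhile pvP).reverse.dropWhile pvP).reverse).length : Int)

-- recursive reading of A's loop (i = absolute index of the list head)
def pvLoopA (i last cur result : Int) : List Int → Int
  | [] => if last ≠ -1 then result + pvTri (cur - last + 1) else result
  | x :: l =>
    if x = 1 ∧ last ≠ -1 then pvLoopA (i + 1) (-1) (-1) (result + pvTri (cur - last + 1)) l
    else if x = 0 then
      (if last = -1 then pvLoopA (i + 1) i i result l else pvLoopA (i + 1) last i result l)
    else pvLoopA (i + 1) last cur result l

-- recursive reading of B: pending segment cs, rest of the prefix l
def pvRunB (cs : List Int) : List Int → Int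
  | [] => pvTri (pvCoreLen cs)
  | x :: l => if x = 1 then pvTri (pvCoreLen cs) + pvRunB [] l else pvRunB (cs ++ [x]) l

theorem pvTri_zero : pvTri 0 = 0 := by decide

theorem pvP_zero : pvP 0 = false := by decide

theorem pvP_of_ne {x : Int} (h : x ≠ 0) : pvP x = true := by
  simp [pvP, h]


theorem dropWhile_all (cs : List Int) (h : ∀ z ∈ cs, z ≠ 0) : cs.dropWhile pvP = [] := by
  induction cs with
  | nil => rfl
  | cons x t ih =>
    simp [pvP_of_ne (h x (by simp))]
    intro z hz
    exact pvP_of_ne (h z (by simp [hz]))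

theorem takeWhile_append_mem (cs ys : List Int) (h : (0 : Int) ∈ cs) :
    (cs ++ ys).takeWhile pvP = cs.takeWhile pvP := by
  induction cs with
  | nil => simp at h
  | cons x t ih =>
    by_cases hx : x = 0
    · subst hx; simp [List.takeWhile_cons, pvP_zero]
    · have h' : (0 : Int) ∈ t := by simpa [hx, Ne.symm hx] using h
      simp [List.takeWhile_cons, pvP_of_ne hx, ih h']

theorem dropWhile_append_mem (cs ys : List Int) (h : (0 : Int) ∈ cs) :
    (cs ++ ys).dropWhile pvP = cs.dropWhile pvP ++ ys := by
  induction cs with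
  | nil => simp at h
  | cons x t ih =>
    by_cases hx : x = 0
    · subst hx; simp [List.dropWhile_cons, pvP_zero]
    · have h' : (0 : Int) ∈ t := by simpa [hx, Ne.symm hx] using h
      simp [List.dropWhile_cons, pvP_of_ne hx, ih h']

theorem length_take_drop (cs : List Int) :
    (cs.takeWhile pvP).length + (cs.dropWhile pvP).length = cs.length := by
  induction cs with
  | nil => rfl
  | cons x t ih =>
    by_cases hx : pvP x <;> simp [List.takeWhile_cons, List.dropWhile_cons, hx] <;> omega


theorem pvCoreLen_all (cs : List Int) (h : ∀ z ∈ cs, z ≠ 0) : pvCoreLen cs = 0 := by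
  simp [pvCoreLen, dropWhile_all cs h]


theorem pvFront_append_mem (cs : List Int) (y : Int) (h : (0 : Int) ∈ cs) :
    pvFront (cs ++ [y]) = pvFront cs := by
  simp [pvFront, takeWhile_append_mem cs [y] h]

theorem pvCoreLen_append_zero_all (cs : List Int) (h : ∀ z ∈ cs, z ≠ 0) :
    pvCoreLen (cs ++ [0]) = 1 := by
  have hd : (cs ++ [0]).dropWhile pvP = [0] := by
    induction cs with
    | nil => simp [List.dropWhile_cons, pvP_zero]
    | cons x t ih =>
      simp only [List.cons_append, List.dropWhile_cons, pvP_of_ne (h x (by simp))]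
      exact ih (fun z hz => h z (by simp [hz]))
  simp [pvCoreLen, hd, List.dropWhile_cons, pvP_zero]

theorem pvCoreLen_append_zero_mem (cs : List Int) (h : (0 : Int) ∈ cs) :
    pvCoreLen (cs ++ [0]) = cs.length - pvFront cs + 1 := by
  have hd := dropWhile_append_mem cs [0] h
  have hlen := length_take_drop cs
  simp only [pvCoreLen, hd, List.reverse_append, List.reverse_cons, List.reverse_nil,
    List.nil_append, List.cons_append, List.dropWhile_cons, pvP_zero]
  simp [pvFront]
  omega

theorem pvCoreLen_append_ne_mem (cs : List Int) (y : Int) (hy : y ≠ 0) (h : (0 : Int) ∈ cs) :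
    pvCoreLen (cs ++ [y]) = pvCoreLen cs := by
  have hd := dropWhile_append_mem cs [y] h
  simp [pvCoreLen, hd, List.dropWhile_cons, pvP_of_ne hy]

theorem pvFront_nonneg (cs : List Int) : 0 ≤ pvFront cs := by
  simp [pvFront]

theorem pvLenApp (cs : List Int) (y : Int) : (((cs ++ [y]).length : Nat) : Int) = (cs.length : Int) + 1 := by
  simp

theorem pvFront_le_length (cs : List Int) : pvFront cs ≤ cs.length := by
  have := length_take_drop cs
  simp [pvFront]
  omega

theorem pvFront_append_zero_all (cs : List Int) (h : ∀ z ∈ cs, z ≠ 0) :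
    pvFront (cs ++ [0]) = cs.length := by
  have ht : (cs ++ [0]).takeWhile pvP = cs := by
    induction cs with
    | nil => simp [List.takeWhile_cons, pvP_zero]
    | cons x t ih =>
      simp only [List.cons_append, List.takeWhile_cons, pvP_of_ne (h x (by simp)),
        if_pos, cond_true]
      simp
      exact ih (fun z hz => h z (by simp [hz]))
  simp [pvFront, ht]

theorem takeWhile_all (cs : List Int) (h : ∀ z ∈ cs, z ≠ 0) : cs.takeWhile pvP = cs := by
  induction cs with
  | nil => rfl
  | cons x t ih =>
    simp [pvP_of_ne (h x (by simp))]
    intro z hz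
    exact pvP_of_ne (h z (by simp [hz]))

theorem pvScan_eq (l : List Int) : pvScan l = (l.takeWhile pvP).length := by
  induction l with
  | nil => rfl
  | cons x t ih =>
    by_cases hx : pvP x <;> simp [pvScan, List.takeWhile_cons, pvP] at * <;> simp [hx, ih]

theorem mem_dropWhile_zero (cs : List Int) (h : (0 : Int) ∈ cs) :
    (0 : Int) ∈ cs.dropWhile pvP := by
  induction cs with
  | nil => simp at h
  | cons x t ih =>
    by_cases hx : x = 0
    · subst hx; simp [List.dropWhile_cons, pvP_zero]
    · have h' : (0 : Int) ∈ t := by simpa [hx, Ne.symm hx] using h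
      simpa [List.dropWhile_cons, pvP_of_ne hx] using ih h'

theorem pvCoreLen_pos (cs : List Int) (h : (0 : Int) ∈ cs) : 1 ≤ pvCoreLen cs := by
  have h1 := mem_dropWhile_zero cs h
  have h2 : (0 : Int) ∈ (cs.dropWhile pvP).reverse := by simpa using h1
  have h3 := mem_dropWhile_zero _ h2
  have hne := List.ne_nil_of_mem h3
  have := List.length_pos_of_ne_nil hne
  simp [pvCoreLen]
  omega

theorem pvCoreLen_eq_sub (cs : List Int) (h : (0 : Int) ∈ cs) :
    pvCoreLen cs = (cs.length : Int) - pvFront cs - ((cs.reverse.takeWhile pvP).length : Int) := by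
  have hsplit : cs.reverse = (cs.dropWhile pvP).reverse ++ (cs.takeWhile pvP).reverse := by
    conv_lhs => rw [← List.takeWhile_append_dropWhile (p := pvP) (l := cs)]
    simp
  have hm : (0 : Int) ∈ (cs.dropWhile pvP).reverse := by simpa using mem_dropWhile_zero cs h
  have htw : cs.reverse.takeWhile pvP = (cs.dropWhile pvP).reverse.takeWhile pvP := by
    rw [hsplit, takeWhile_append_mem _ _ hm]
  have h1 := length_take_drop ((cs.dropWhile pvP).reverse)
  have h2 := length_take_drop cs
  simp only [pvCoreLen, pvFront, htw]
  simp only [List.length_reverse] at h1 ⊢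
  omega

theorem pvSegCount_eq (seg : List Int) : pvSegCount seg = pvTri (pvCoreLen seg) := by
  have hi := pvScan_eq seg
  have hj := pvScan_eq seg.reverse
  by_cases h : (0 : Int) ∈ seg
  · have hc := pvCoreLen_eq_sub seg h
    have hp := pvCoreLen_pos seg h
    simp only [pvFront] at hc
    have hcond : ((pvScan seg : Nat) : Int) ≤
        (seg.length : Int) - 1 - ((pvScan seg.reverse : Nat) : Int) := by
      rw [hi, hj]; omega
    simp only [pvSegCount]
    rw [if_pos hcond]
    have hspan : (seg.length : Int) - 1 - ((pvScan seg.reverse : Nat) : Int) -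
        ((pvScan seg : Nat) : Int) + 1 = pvCoreLen seg := by
      rw [hi, hj]; omega
    rw [hspan, pvTri]
  · have hall : ∀ z ∈ seg, z ≠ 0 := by
      intro z hz hz0
      exact h (hz0 ▸ hz)
    have h0 : pvCoreLen seg = 0 := pvCoreLen_all seg hall
    have hlen : pvScan seg = seg.length := by rw [hi, takeWhile_all seg hall]
    have hcond : ¬ (((pvScan seg : Nat) : Int) ≤
        (seg.length : Int) - 1 - ((pvScan seg.reverse : Nat) : Int)) := by
      rw [hlen]; omega
    simp only [pvSegCount]
    rw [if_neg hcond, h0, pvTri_zero]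

-- the coupling invariant between A's (last, cur) and B's pending segment cs at index i
def pvInv (i last cur : Int) (cs : List Int) : Prop :=
  (cs.length : Int) ≤ i ∧
  ((∀ z ∈ cs, z ≠ 0) ∧ last = -1 ∧ cur = -1 ∨
    (0 : Int) ∈ cs ∧ last = i - cs.length + pvFront cs ∧ cur = last + pvCoreLen cs - 1)

-- MAIN: A's loop and B's segment recursion agree under the invariant
theorem pvMain (l : List Int) : ∀ (i last cur result : Int) (cs : List Int),
    pvInv i last cur cs → pvLoopA i last cur result l = result + pvRunB cs l := by
  induction l with
  | nil =>
    intro i last cur result cs hinv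
    rcases hinv with ⟨hlen, h1 | h2⟩
    · rcases h1 with ⟨hall, hlast, hcur⟩
      simp [pvLoopA, pvRunB, hlast, pvCoreLen_all cs hall, pvTri_zero]
    · rcases h2 with ⟨hmem, hlast, hcur⟩
      have hf := pvFront_nonneg cs
      have hne : last ≠ -1 := by omega
      have : cur - last + 1 = pvCoreLen cs := by omega
      simp [pvLoopA, pvRunB, hne, this]
  | cons x l ih =>
    intro i last cur result cs hinv
    rcases hinv with ⟨hlen, hcase⟩
    by_cases hx1 : x = 1
    · -- a 1: B closes the segment; A flushes iff a zero was pending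
      subst hx1
      rcases hcase with ⟨hall, hlast, hcur⟩ | ⟨hmem, hlast, hcur⟩
      · have : ¬((1 : Int) = 1 ∧ last ≠ -1) := by simp [hlast]
        rw [pvLoopA, if_neg this, if_neg (by norm_num)]
        rw [ih (i + 1) last cur result [] ⟨by simp; omega, Or.inl ⟨by simp, hlast, hcur⟩⟩]
        simp [pvRunB, pvCoreLen_all cs hall, pvTri_zero]
      · have hf := pvFront_nonneg cs
        have hne : last ≠ -1 := by omega
        rw [pvLoopA, if_pos ⟨rfl, hne⟩]
        rw [ih (i + 1) (-1) (-1) _ [] ⟨by simp; omega, Or.inl ⟨by simp, rfl, rfl⟩⟩]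
        have : cur - last + 1 = pvCoreLen cs := by omega
        simp [pvRunB, this]
        ring
    · by_cases hx0 : x = 0
      · -- a 0: B extends the segment; A records first/last zero index
        subst hx0
        rcases hcase with ⟨hall, hlast, hcur⟩ | ⟨hmem, hlast, hcur⟩
        · rw [pvLoopA, if_neg (by simp), if_pos rfl, if_pos hlast]
          rw [ih (i + 1) i i result (cs ++ [0])
            ⟨by rw [pvLenApp]; omega,
             Or.inr ⟨by simp, by
               rw [pvFront_append_zero_all cs hall, pvLenApp]; omega, by
               rw [pvCoreLen_append_zero_all cs hall]; omega⟩⟩]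
          simp [pvRunB]
        · have hf := pvFront_nonneg cs
          have hne : last = -1 → False := by omega
          rw [pvLoopA, if_neg (by simp), if_pos rfl, if_neg (by omega)]
          rw [ih (i + 1) last i result (cs ++ [0])
            ⟨by rw [pvLenApp]; omega,
             Or.inr ⟨by simp, by
               rw [pvFront_append_mem cs 0 hmem, pvLenApp]; omega, by
               rw [pvCoreLen_append_zero_mem cs hmem]
               have := pvFront_le_length cs
               omega⟩⟩]
          simp [pvRunB]
      · -- any other value: neither flushes nor counts, but stays inside the segment
        rw [pvLoopA, if_neg (by simp [hx1]), if_neg (by simp [hx0])]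
        rcases hcase with ⟨hall, hlast, hcur⟩ | ⟨hmem, hlast, hcur⟩
        · have hall' : ∀ z ∈ cs ++ [x], z ≠ 0 := by
            intro z hz
            rcases List.mem_append.mp hz with h | h
            · exact hall z h
            · simp at h; subst h; exact hx0
          rw [ih (i + 1) last cur result (cs ++ [x])
            ⟨by rw [pvLenApp]; omega, Or.inl ⟨hall', hlast, hcur⟩⟩]
          simp [pvRunB, hx1]
        · rw [ih (i + 1) last cur result (cs ++ [x])
            ⟨by rw [pvLenApp]; omega,
             Or.inr ⟨by simp [hmem], by
               rw [pvFront_append_mem cs x hmem, pvLenApp]; omega, by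
               rw [pvCoreLen_append_ne_mem cs x hx0 hmem]; omega⟩⟩]
          simp [pvRunB, hx1]

-- bridge A: the fold over range(i, n) with arr[i] lookups is pvLoopA on the slice
theorem pvBridgeA (arr : List Int) : ∀ (k : Nat) (n i last cur result : Int),
    0 ≤ i → i + k = n → n ≤ arr.length →
    pvFinishA ((PySem.List.pyRange i n 1).foldl (pvStepA arr) (last, cur, result)) =
      pvLoopA i last cur result ((arr.drop i.toNat).take k) := by
  intro k
  induction k with
  | zero =>
    intro n i last cur result h0 hk hn
    have : n ≤ i := by omega
    rw [PySem.List.pyRange_one_eq_nil this]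
    simp [pvFinishA, pvLoopA, pvTri]
  | succ k ih =>
    intro n i last cur result h0 hk hn
    have hlt : i < n := by omega
    have hilen : i.toNat < arr.length := by omega
    have hget : PySem.List.pyGetD arr i 0 = arr[i.toNat] :=
      PySem.List.pyGetD_eq_getElem arr 0 h0 (by omega)
    rw [PySem.List.pyRange_one_cons hlt, List.foldl_cons,
      List.drop_eq_getElem_cons hilen, List.take_succ_cons]
    have hdrop : arr.drop (i.toNat + 1) = arr.drop (i + 1).toNat := by
      congr 1; omega
    rw [hdrop]
    by_cases c1 : arr[i.toNat] = 1 ∧ last ≠ -1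
    · rw [pvLoopA, if_pos c1]
      have : pvStepA arr (last, cur, result) i =
          (-1, -1, result + pvTri (cur - last + 1)) := by
        simp [pvStepA, hget, c1, pvTri]
      rw [this, ih n (i + 1) _ _ _ (by omega) (by omega) hn]
    · by_cases c0 : arr[i.toNat] = 0
      · rw [pvLoopA, if_neg c1, if_pos c0]
        by_cases cl : last = -1
        · have : pvStepA arr (last, cur, result) i = (i, i, result) := by
            simp [pvStepA, hget, c1, c0, cl]
          rw [this, if_pos cl, ih n (i + 1) _ _ _ (by omega) (by omega) hn]
        · have : pvStepA arr (last, cur, result) i = (last, i, result) := by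
            simp [pvStepA, hget, c1, c0, cl]
          rw [this, if_neg cl, ih n (i + 1) _ _ _ (by omega) (by omega) hn]
      · rw [pvLoopA, if_neg c1, if_neg c0]
        have hst : pvStepA arr (last, cur, result) i = (last, cur, result) := by
          simp only [pvStepA, hget]
          rw [if_neg c1, if_neg c0]
        rw [hst, ih n (i + 1) _ _ _ (by omega) (by omega) hn]

-- bridge B: the two folds of port B compute pvRunB on the prefix

theorem pvBridgeB (l : List Int) : ∀ (segs : List (List Int)) (cs : List Int) (t : Int),
    (((l.foldl pvStepB (segs, cs)).1 ++ [(l.foldl pvStepB (segs, cs)).2]).foldl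
        (fun total seg => total + pvSegCount seg) t) =
      segs.foldl (fun total seg => total + pvSegCount seg) t + pvRunB cs l := by
  induction l with
  | nil =>
    intro segs cs t
    simp [pvRunB, List.foldl_append, pvSegCount_eq]
  | cons x l ih =>
    intro segs cs t
    by_cases hx : x = 1
    · subst hx
      have hs : pvStepB (segs, cs) 1 = (segs ++ [cs], []) := by simp [pvStepB]
      rw [List.foldl_cons, hs, ih (segs ++ [cs]) [] t]
      simp [pvRunB, List.foldl_append, pvSegCount_eq]
      ring
    · have hs : pvStepB (segs, cs) x = (segs, cs ++ [x]) := by simp [pvStepB, hx]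
      rw [List.foldl_cons, hs, ih segs (cs ++ [x]) t]
      simp [pvRunB, hx]

-- A equals pvLoopA on the whole prefix; B equals pvRunB on the same prefix
theorem pvA_eq (n : Int) (arr : List Int) (h : n ≤ arr.length) :
    no_of_subarrays n arr = pvLoopA 0 (-1) (-1) 0 (arr.take (max n 0).toNat) := by
  by_cases hn : 0 ≤ n
  · have := pvBridgeA arr n.toNat n 0 (-1) (-1) 0 le_rfl (by omega) h
    simpa [no_of_subarrays, Int.toNat_of_nonneg hn, max_eq_left hn] using this
  · have h0 : PySem.List.pyRange 0 n 1 = [] := PySem.List.pyRange_one_eq_nil (by omega)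
    have hm : (max n 0).toNat = 0 := by omega
    simp [no_of_subarrays, h0, pvFinishA, pvLoopA, hm]

theorem pvB_eq (n : Int) (arr : List Int) :
    no_of_subarrays_alt n arr = pvRunB [] (arr.take (max n 0).toNat) := by
  have hs : PySem.List.slice arr none (some (max n 0)) = arr.take (max n 0).toNat :=
    PySem.List.slice_to arr (by omega)
  rw [no_of_subarrays_alt]
  rw [hs]
  have := pvBridgeB (arr.take (max n 0).toNat) [] [] 0
  simpa using this

-- ===== VERDICT (by name: the statement is the Claim_ definition above) =====
theorem no_of_subarrays_spec : Claim_equal_no_of_subarrays := by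
  intro n arr _ hpre
  unfold Spec_no_of_subarrays
  rw [pvA_eq n arr hpre, pvB_eq n arr]
  have := pvMain (arr.take (max n 0).toNat) 0 (-1) (-1) 0 []
    ⟨by simp, Or.inl ⟨by simp, rfl, rfl⟩⟩
  simpa using this
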